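-- pv_equiv track=rewrite | github.com/KelseySt/dance-ai | flaskr/dtw.py | ref_to_stu
-- ===== SOURCE A (Python) =====
-- def ref_to_stu(threshold, path):
--     result = {}
--     for first, second in path:
--         if second not in result:
--             result[second] = []  # Initialize the list if key doesn't exist
--         result[second].append(first)  # Append the first value to the list
--     mismatch_pairs = {}
--     for key, value in result.items():
--        if len(value) > threshold:
--            mismatch_pairs[key] = value
--
--     return mismatch_pairs
-- ===== SOURCE B (Python) =====
-- def ref_to_stu(threshold, path):
--     # Alternative decomposition: dedup the second values in first-seen order,
--     # then one nested scan of path per distinct key builds each group directly.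
--     keys = list(dict.fromkeys(second for _, second in path))
--     out = {}
--     for s in keys:
--         group = [first for first, sec in path if sec == s]
--         if len(group) > threshold:
--             out[s] = group
--     return out
-- ===== Notes on version B (the rewrite author's own statement) =====
-- stated objective: alternative
-- what changed: Replaces the single-pass dict grouping plus items-filter pass by deduplicating the second values in first-seen order and building each group with its own scan of path, inserting a group only when it beats the threshold.
import Mathlib
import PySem

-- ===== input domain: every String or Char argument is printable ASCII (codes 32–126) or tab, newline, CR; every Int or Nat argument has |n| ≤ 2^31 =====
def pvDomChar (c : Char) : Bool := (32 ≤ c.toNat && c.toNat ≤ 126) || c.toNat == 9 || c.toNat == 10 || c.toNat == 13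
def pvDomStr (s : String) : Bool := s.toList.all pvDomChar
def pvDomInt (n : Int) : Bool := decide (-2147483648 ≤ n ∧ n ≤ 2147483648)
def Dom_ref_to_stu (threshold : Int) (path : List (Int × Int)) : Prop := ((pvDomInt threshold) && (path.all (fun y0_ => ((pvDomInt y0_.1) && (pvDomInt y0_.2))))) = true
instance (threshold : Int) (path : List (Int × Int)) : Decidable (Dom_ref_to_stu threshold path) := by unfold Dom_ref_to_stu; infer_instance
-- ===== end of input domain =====

-- B replaces the one-pass dict grouping + filter pass by a dedup of the keys and one
-- scan of path per distinct key (alternative decomposition, not faster).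

-- ===== PORT A =====
def ref_to_stu (threshold : Int) (path : List (Int × Int)) : List (Int × List Int) :=
  let result : PySem.Dict Int (List Int) :=
    path.foldl (fun d p =>
      let d := if d.contains p.2 then d else d.insert p.2 []   -- if second not in result: result[second] = []
      d.insert p.2 (d.getD p.2 [] ++ [p.1]))                   -- result[second].append(first)
      PySem.Dict.empty
  let mismatch_pairs : PySem.Dict Int (List Int) :=
    result.items.foldl (fun m p =>
      if threshold < (p.2.length : Int) then m.insert p.1 p.2 else m)
      PySem.Dict.empty
  mismatch_pairs.items

-- ===== PORT B =====
def ref_to_stu_alt (threshold : Int) (path : List (Int × Int)) : List (Int × List Int) :=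
  let keys := PySem.List.dedup (path.map (fun p => p.2))       -- list(dict.fromkeys(...))
  let out : PySem.Dict Int (List Int) :=
    keys.foldl (fun m s =>
      let group := (path.filter (fun p => p.2 == s)).map (fun p => p.1)
      if threshold < (group.length : Int) then m.insert s group else m)
      PySem.Dict.empty
  out.items

-- ===== PRECONDITION & SPEC =====
def Spec_ref_to_stu (threshold : Int) (path : List (Int × Int)) (out : List (Int × List Int)) : Prop := out = ref_to_stu_alt threshold path
instance (threshold : Int) (path : List (Int × Int)) (out : List (Int × List Int)) : Decidable (Spec_ref_to_stu threshold path out) := by unfold Spec_ref_to_stu; infer_instance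

-- ===== CLAIM (what is proved, stated in full; the proofs are below) =====
def Claim_equal_ref_to_stu : Prop := ∀ (threshold : Int) (path : List (Int × Int)), Dom_ref_to_stu threshold path → Spec_ref_to_stu threshold path (ref_to_stu threshold path)

-- ===== LEMMAS AND PROOFS =====

-- A's grouping step (setdefault-then-append) equals a single Dict.modify appending the first component.
theorem step_eq_modify (d : PySem.Dict Int (List Int)) (p : Int × Int) :
    (let d' := if d.contains p.2 then d else d.insert p.2 []
     d'.insert p.2 (d'.getD p.2 [] ++ [p.1])) = d.modify p.2 [] (· ++ [p.1]) := by
  simp only []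
  by_cases h : d.contains p.2 = true
  · simp [h, PySem.Dict.modify, PySem.Dict.insert, PySem.Dict.getD, PySem.Dict.get?]
  · have h' : d.contains p.2 = false := by simpa using h
    have hkey : ∀ q ∈ d.items, q.1 ≠ p.2 := by
      intro q hq hne
      apply h
      rw [PySem.Dict.contains_iff_mem_keys]
      simp only [PySem.Dict.keys]
      exact hne ▸ List.mem_map_of_mem hq
    have hf : List.find? (fun q => q.1 == p.2) d.items = none := by
      rw [List.find?_eq_none]; intro x hx; simpa using hkey x hx
    rw [if_neg h, PySem.Dict.getD_insert_self, PySem.Dict.insert_insert_self]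
    apply PySem.Dict.ext
    rw [PySem.Dict.items_insert_of_not_contains (h := h')]
    simp [PySem.Dict.modify, hf, PySem.Dict.getD, PySem.Dict.get?]
    rw [PySem.Dict.items_insert_of_not_contains (h := h')]

-- The modify-form grouping loop yields exactly: deduped seconds, each paired with the
-- firsts whose second equals it, in order.
theorem itemsA_modify (path : List (Int × Int)) :
    (path.foldl (fun d p => d.modify p.2 [] (· ++ [p.1]))
      (PySem.Dict.empty : PySem.Dict Int (List Int))).items
    = (PySem.List.dedup (path.map (fun p => p.2))).map
        (fun k => (k, (path.filter (fun p => p.2 == k)).map (fun p => p.1))) := by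
  have hswap : path.foldl (fun d p => d.modify p.2 [] (· ++ [p.1]))
      (PySem.Dict.empty : PySem.Dict Int (List Int))
      = (path.map Prod.swap).foldl (fun d q => d.modify q.1 [] (· ++ [q.2])) PySem.Dict.empty := by
    rw [List.foldl_map]; simp [Prod.swap]
  have hkeys : (path.foldl (fun d p => d.modify p.2 [] (· ++ [p.1]))
      (PySem.Dict.empty : PySem.Dict Int (List Int))).keys
      = PySem.List.dedup (path.map (fun p => p.2)) := by
    rw [PySem.Dict.keys_foldl_modify_key]
    simp [PySem.Dict.keys, PySem.Dict.empty, PySem.Set.update_nil_left]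
  have hnodup : (path.foldl (fun d p => d.modify p.2 [] (· ++ [p.1]))
      (PySem.Dict.empty : PySem.Dict Int (List Int))).keys.Nodup := by
    exact PySem.Dict.nodup_keys_foldl_modify_key _ _ _ _ _
      (by simp [PySem.Dict.keys, PySem.Dict.empty])
  have hgetD : ∀ k, (path.foldl (fun d p => d.modify p.2 [] (· ++ [p.1]))
      (PySem.Dict.empty : PySem.Dict Int (List Int))).getD k []
      = (path.filter (fun p => p.2 == k)).map (fun p => p.1) := by
    intro k
    rw [hswap, PySem.Dict.getD_foldl_modify_append]
    simp [List.filter_map, Function.comp_def, Prod.swap, PySem.Dict.getD, PySem.Dict.get?,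
      PySem.Dict.empty]
  rw [PySem.Dict.items_eq_map_keys _ hnodup [], hkeys]
  exact List.map_congr_left (fun k _ => by rw [hgetD k])

-- A's first loop, in its literal form.
theorem itemsA (path : List (Int × Int)) :
    (path.foldl (fun d p =>
      let d := if d.contains p.2 then d else d.insert p.2 []
      d.insert p.2 (d.getD p.2 [] ++ [p.1])) (PySem.Dict.empty : PySem.Dict Int (List Int))).items
    = (PySem.List.dedup (path.map (fun p => p.2))).map
        (fun k => (k, (path.filter (fun p => p.2 == k)).map (fun p => p.1))) := by
  have hstep : (fun (d : PySem.Dict Int (List Int)) (p : Int × Int) =>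
      let d := if d.contains p.2 then d else d.insert p.2 []
      d.insert p.2 (d.getD p.2 [] ++ [p.1])) = (fun d p => d.modify p.2 [] (· ++ [p.1])) :=
    funext fun d => funext fun p => step_eq_modify d p
  rw [hstep]
  exact itemsA_modify path

-- ===== VERDICT (by name: the statement is the Claim_ definition above) =====
theorem ref_to_stu_spec : Claim_equal_ref_to_stu := by
  intro threshold path _
  show ref_to_stu threshold path = ref_to_stu_alt threshold path
  simp only [ref_to_stu, ref_to_stu_alt]
  rw [itemsA, List.foldl_map]
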